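-- pv_equiv track=rewrite | github.com/nocturnalbeast/assignments-n-stuff | stuff/vmware_test/ladder.py | lotteryCoupons
-- ===== SOURCE A (Python) =====
-- def lotteryCoupons(n):
--     list_numbers = [str(i) for i in range(1,n+1)]
--     for idx in range(len(list_numbers)):
--         sum_num = [int(num) for num in list(list_numbers[idx])]
--         list_numbers[idx] = sum(sum_num)
--     dict_count = {num:0 for num in list_numbers}
--     for num in list_numbers:
--         dict_count[num] = dict_count[num] + 1
--     return len([(key, dict_count[key]) for key in dict_count.keys() if dict_count[key] == max(dict_count.values())])
-- ===== SOURCE B (Python) =====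
-- def lotteryCoupons(n):
--     # Digit divide-and-conquer: never iterates over 1..n. freq(m) returns the
--     # frequency vector (indexed by digit sum) of the numbers 0..m, built from the
--     # decade decomposition x = 10*q + dd: freq(m)[s] = sum over dd of
--     # freq((m-dd)//10)[s-dd], where (m-dd)//10 is m//10 for dd <= m%10 and
--     # m//10 - 1 otherwise.
--     if n <= 0:
--         return 0
--     d = 0
--     t = n
--     while t:
--         d += 1
--         t //= 10
--     size = 9 * d + 1  # digit sums of numbers <= n are < size
--
--     def freq(m):
--         if m < 0:
--             return [0] * size
--         if m == 0:
--             v = [0] * size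
--             v[0] = 1
--             return v
--         q, r = divmod(m, 10)
--         top = freq(q)
--         low = freq(q - 1)
--         v = [0] * size
--         for dd in range(10):
--             src = top if dd <= r else low
--             for s in range(dd, size):
--                 v[s] += src[s - dd]
--         return v
--
--     v = freq(n)
--     best = max(v[1:])
--     return sum(1 for c in v[1:] if c == best)
-- ===== Notes on version B (the rewrite author's own statement) =====
-- stated objective: faster
-- what changed: Replaces A's enumeration of every number 1..n (string digit sums tallied into a dict, then a max-filter pass) by a digit divide-and-conquer: freq(m), the frequency vector of digit sums over 0..m, is computed recursively from freq(m//10) and freq(m//10 - 1) via the decade decomposition x = 10*q + d, so no number in 1..n is ever visited.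
import Mathlib
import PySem

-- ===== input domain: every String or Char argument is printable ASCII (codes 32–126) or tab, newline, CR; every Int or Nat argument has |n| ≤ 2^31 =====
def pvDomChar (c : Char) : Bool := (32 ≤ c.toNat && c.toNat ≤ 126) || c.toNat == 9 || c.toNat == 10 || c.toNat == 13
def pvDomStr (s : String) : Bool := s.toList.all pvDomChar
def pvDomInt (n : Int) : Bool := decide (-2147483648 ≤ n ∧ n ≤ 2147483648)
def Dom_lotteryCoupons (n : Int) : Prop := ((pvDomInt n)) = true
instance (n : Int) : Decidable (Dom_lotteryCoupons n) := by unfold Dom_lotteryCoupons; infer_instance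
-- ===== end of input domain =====

-- B replaces A's walk over every number 1..n by a digit divide-and-conquer that builds the
-- digit-sum frequency vector of 0..m recursively from those of m//10 and m//10 - 1; asymptotically faster.

-- ===== PORT A =====
def lotteryCoupons (n : Int) : Int :=
  -- list_numbers = [str(i) for i in range(1, n+1)]
  let list1 : List String := (PySem.List.pyRange 1 (n + 1) 1).map (fun i => PySem.Int.toStr i)
  -- for idx in range(len(list_numbers)): list_numbers[idx] = sum([int(num) for num in list(list_numbers[idx])])
  -- (each slot is rewritten in place from its own value: a map over the list; list(s) iterates the
  --  characters, and int(num) on a single decimal-digit character never raises, so getD 0 is exact)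
  let listNumbers : List Int :=
    list1.map (fun s => ((s.toList.map (fun c => (PySem.Int.ofChars? [c]).getD 0)).sum))
  -- dict_count = {num: 0 for num in list_numbers}
  let dict0 : PySem.Dict Int Int :=
    listNumbers.foldl (fun d num => d.insert num 0) PySem.Dict.empty
  -- for num in list_numbers: dict_count[num] = dict_count[num] + 1   (key always present: getD exact)
  let dictCount : PySem.Dict Int Int :=
    listNumbers.foldl (fun d num => d.insert num (d.getD num 0 + 1)) dict0
  -- len([(key, dict_count[key]) for key in dict_count.keys() if dict_count[key] == max(dict_count.values())])
  -- (max(...) sits inside the per-key condition, so it is only evaluated with the dict nonempty: getD 0 exact)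
  (((dictCount.keys.filter
      (fun k => dictCount.getD k 0 == (PySem.List.max? dictCount.values (fun y => y)).getD 0)).map
      (fun k => (k, dictCount.getD k 0))).length : Int)

-- ===== PORT B =====
-- d = 0; t = n; while t: d += 1; t //= 10   — t starts at n ≥ 1 and stays nonnegative, so 't' truthy is 0 < t
def pvNdigLoop (d : Int) (t : Int) : Int :=
  if _h : 0 < t then pvNdigLoop (d + 1) (PySem.Int.floordiv t 10) else d
termination_by t.toNat
decreasing_by
  rw [PySem.Int.floordiv_eq_ediv_of_pos (by omega : (0:Int) < 10)]
  omega

-- freq(m): the two recursive calls freq(q) and freq(q-1); 'for s in range(dd, size)' is the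
-- index list List.range' dd (size - dd) (same length and elements); every v[s] / src[s-dd]
-- index is ≥ 0, so list set/getD are exact for Python's indexing here
def pvFreq (size : Nat) (m : Int) : List Int :=
  if _hneg : m < 0 then List.replicate size 0
  else if _h0 : m = 0 then (List.replicate size 0).set 0 1
  else
    let q := PySem.Int.floordiv m 10
    let r := PySem.Int.mod m 10
    let top := pvFreq size q
    let low := pvFreq size (q - 1)
    (List.range 10).foldl
      (fun (v : List Int) (dd : Nat) =>
        let src := if (dd : Int) ≤ r then top else low
        (List.range' dd (size - dd)).foldl
          (fun v s => v.set s (v.getD s 0 + src.getD (s - dd) 0)) v)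
      (List.replicate size 0)
termination_by m.toNat
decreasing_by
  all_goals
    rw [PySem.Int.floordiv_eq_ediv_of_pos (by omega : (0:Int) < 10)]
    omega

def lotteryCoupons_alt (n : Int) : Int :=
  if n ≤ 0 then 0
  else
    let d := pvNdigLoop 0 n
    -- size = 9 * d + 1; size is positive here, so size.toNat is exact for the Python int
    let size := 9 * d + 1
    let v := pvFreq size.toNat n
    -- v[1:] (nonempty here, so max(...) never raises)
    let vt := PySem.List.slice v (some 1) none
    let best := (PySem.List.max? vt (fun y => y)).getD 0
    -- sum(1 for c in v[1:] if c == best)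
    (vt.map (fun c => if c == best then (1 : Int) else 0)).sum

-- ===== PRECONDITION & SPEC =====
def Spec_lotteryCoupons (n : Int) (out : Int) : Prop := out = lotteryCoupons_alt n
instance (n : Int) (out : Int) : Decidable (Spec_lotteryCoupons n out) := by unfold Spec_lotteryCoupons; infer_instance

-- ===== CLAIM (what is proved, stated in full; the proofs are below) =====
def Claim_equal_lotteryCoupons : Prop := ∀ (n : Int), Dom_lotteryCoupons n → Spec_lotteryCoupons n (lotteryCoupons n)

-- ===== LEMMAS AND PROOFS =====

-- arithmetic digit sum of a natural number (proof-only helper)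
def pvDsum (n : Nat) : Int :=
  if n = 0 then 0 else pvDsum (n / 10) + ((n % 10 : Nat) : Int)
decreasing_by exact Nat.div_lt_self (by omega) (by omega)

-- number of decimal digits (proof-only helper)
def pvNdigN (n : Nat) : Nat :=
  if n = 0 then 0 else pvNdigN (n / 10) + 1
decreasing_by exact Nat.div_lt_self (by omega) (by omega)

-- how many x in [0, t) have digit sum s (proof-only counting function)
def pvCnt (t : Nat) (s : Int) : Nat :=
  (List.range t).countP (fun x => pvDsum x == s)

theorem pvDsum_split (x : Nat) : pvDsum x = pvDsum (x / 10) + ((x % 10 : Nat) : Int) := by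
  by_cases h : x = 0
  · subst h; simp [pvDsum]
  · rw [pvDsum, if_neg h]

theorem pvDsum_nonneg (x : Nat) : 0 ≤ pvDsum x := by
  induction x using Nat.strong_induction_on with
  | _ x ih =>
    rw [pvDsum]
    by_cases h : x = 0
    · simp [h]
    · rw [if_neg h]
      have := ih (x / 10) (Nat.div_lt_self (by omega) (by omega))
      positivity

theorem pvDsum_pos (x : Nat) (h : 1 ≤ x) : 1 ≤ pvDsum x := by
  induction x using Nat.strong_induction_on with
  | _ x ih =>
    rw [pvDsum, if_neg (by omega)]
    by_cases h10 : x % 10 = 0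
    · have hx : 1 ≤ x / 10 := by omega
      have := ih (x / 10) (Nat.div_lt_self (by omega) (by omega)) hx
      omega
    · have := pvDsum_nonneg (x / 10)
      omega

theorem pvNdigN_mono (x y : Nat) (h : x ≤ y) : pvNdigN x ≤ pvNdigN y := by
  induction y using Nat.strong_induction_on generalizing x with
  | _ y ih =>
    by_cases hx : x = 0
    · rw [hx, pvNdigN]
      simp
    · have hy : y ≠ 0 := by omega
      have ex : pvNdigN x = pvNdigN (x / 10) + 1 := by rw [pvNdigN, if_neg hx]
      have ey : pvNdigN y = pvNdigN (y / 10) + 1 := by rw [pvNdigN, if_neg hy]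
      rw [ex, ey]
      have := ih (y / 10) (Nat.div_lt_self (by omega) (by omega)) (x / 10) (Nat.div_le_div_right h)
      omega

theorem pvDsum_le (x : Nat) : pvDsum x ≤ 9 * (pvNdigN x : Int) := by
  induction x using Nat.strong_induction_on with
  | _ x ih =>
    by_cases hx : x = 0
    · simp [hx, pvDsum, pvNdigN]
    · rw [pvDsum, if_neg hx, pvNdigN, if_neg hx]
      have h1 := ih (x / 10) (Nat.div_lt_self (by omega) (by omega))
      have h2 : x % 10 < 10 := by omega
      push_cast
      push_cast at h1
      omega

theorem pvNdigLoop_eq (d : Int) (k : Nat) : pvNdigLoop d (k : Int) = d + (pvNdigN k : Int) := by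
  induction k using Nat.strong_induction_on generalizing d with
  | _ k ih =>
    rw [pvNdigLoop]
    by_cases hk : 0 < (k : Int)
    · rw [dif_pos hk, PySem.Int.floordiv_eq_ediv_of_pos (by omega)]
      have hd : (k : Int) / 10 = ((k / 10 : Nat) : Int) := by push_cast; rfl
      rw [hd, ih (k / 10) (Nat.div_lt_self (by omega) (by omega))]
      have ek : pvNdigN k = pvNdigN (k / 10) + 1 := by rw [pvNdigN, if_neg (show k ≠ 0 by omega)]
      rw [ek]
      push_cast
      ring
    · rw [dif_neg hk]
      have hk0 : k = 0 := by omega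
      subst hk0
      simp [pvNdigN]

-- int(c) of a decimal digit character
theorem pv_ofChars_digitChar (m : Nat) (h : m < 10) :
    PySem.Int.ofChars? [Nat.digitChar m] = some (m : Int) := by
  interval_cases m <;> decide

-- summing int(c) over the characters Nat.toDigitsCore emits yields the arithmetic digit sum
theorem pv_toDigitsCore_sum (fuel : Nat) : ∀ (n : Nat) (ds : List Char), n < 10 ^ fuel →
    ((Nat.toDigitsCore 10 fuel n ds).map (fun c => (PySem.Int.ofChars? [c]).getD 0)).sum
      = pvDsum n + ((ds.map (fun c => (PySem.Int.ofChars? [c]).getD 0)).sum) := by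
  induction fuel with
  | zero =>
    intro n ds h
    have hn : n = 0 := by omega
    subst hn
    simp [Nat.toDigitsCore, pvDsum]
  | succ fuel ih =>
    intro n ds h
    have hd : PySem.Int.ofChars? [(n % 10).digitChar] = some ((n % 10 : Nat) : Int) :=
      pv_ofChars_digitChar _ (Nat.mod_lt _ (by omega))
    by_cases h0 : n / 10 = 0
    · have hstep : Nat.toDigitsCore 10 (fuel + 1) n ds = (n % 10).digitChar :: ds := by
        simp [Nat.toDigitsCore, h0]
      rw [hstep]
      have hpv : pvDsum n = ((n % 10 : Nat) : Int) := by
        rw [pvDsum]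
        by_cases hn : n = 0
        · simp [hn]
        · simp [hn, h0, pvDsum]
      simp [hd, hpv]
    · have hstep : Nat.toDigitsCore 10 (fuel + 1) n ds
          = Nat.toDigitsCore 10 fuel (n / 10) ((n % 10).digitChar :: ds) := by
        simp [Nat.toDigitsCore, h0]
      have hlt : n / 10 < 10 ^ fuel := Nat.div_lt_of_lt_mul (by rw [Nat.pow_succ] at h; omega)
      have hn : n ≠ 0 := by omega
      rw [hstep, ih (n / 10) _ hlt]
      conv_rhs => rw [pvDsum, if_neg hn]
      simp [hd]
      ring

-- digit sum computed from str(i) equals the arithmetic digit sum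
theorem pv_strDigitSum_eq (i : Int) (h : 0 ≤ i) :
    (((PySem.Int.toStr i).toList.map (fun c => (PySem.Int.ofChars? [c]).getD 0)).sum)
      = pvDsum i.toNat := by
  have h1 : 10 ^ (i.toNat + 1) > i.toNat := by
    calc i.toNat < 10 ^ i.toNat := Nat.lt_pow_self (by omega)
    _ ≤ 10 ^ (i.toNat + 1) := Nat.pow_le_pow_right (by omega) (by omega)
  have h2 : PySem.Int.toChars i = Nat.toDigits 10 i.toNat := by
    simp [PySem.Int.toChars, show ¬ i < 0 by omega]
  rw [show PySem.Int.toStr i = String.ofList (PySem.Int.toChars i) from rfl]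
  simp only [String.toList_ofList]
  rw [h2, show Nat.toDigits 10 i.toNat = Nat.toDigitsCore 10 (i.toNat + 1) i.toNat [] from rfl,
    pv_toDigitsCore_sum (i.toNat + 1) i.toNat [] h1]
  simp

-- the zero-initialising dict comprehension: every lookup with default 0 gives 0
theorem pv_phase1_getD (L : List Int) : ∀ (d : PySem.Dict Int Int) (k : Int),
    (L.foldl (fun d num => d.insert num 0) d).getD k 0
      = if k ∈ L then 0 else d.getD k 0 := by
  induction L with
  | nil => simp
  | cons x L ih =>
    intro d k
    simp only [List.foldl_cons, ih, PySem.Dict.getD_insert, List.mem_cons]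
    by_cases h1 : k ∈ L <;> by_cases h2 : k = x <;> simp [h1, h2]

-- updating a set with its own underlying list changes nothing
theorem pv_update_self (L : List Int) :
    PySem.Set.update (PySem.Set.ofList L) L = PySem.Set.ofList L := by
  rw [PySem.Set.update_eq_append_filter]
  have hnil : (PySem.Set.ofList L).filter
      (fun y => !(PySem.Set.contains (PySem.Set.ofList L) y)) = [] := by
    rw [List.filter_eq_nil_iff]
    intro a ha
    simp [PySem.Set.contains_eq_listContains, ha]
  rw [hnil, List.append_nil]

-- A's two-phase dict build (zero dict, then counting loop) is Counter(L)
theorem pv_dictA_eq_counter (L : List Int) :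
    L.foldl (fun d num => d.insert num (d.getD num 0 + 1))
        (L.foldl (fun d num => d.insert num 0) PySem.Dict.empty)
      = PySem.Dict.counter L := by
  apply PySem.Dict.ext
  have hk1 : (L.foldl (fun d num => d.insert num 0) (PySem.Dict.empty : PySem.Dict Int Int)).keys
      = PySem.Set.ofList L := by
    rw [PySem.Dict.keys_foldl_insert (f := fun _ _ => (0:Int))]
    simp [PySem.Dict.keys_empty, PySem.Set.update_nil_left]
  have hnd : (L.foldl (fun d num => d.insert num (d.getD num 0 + 1))
        (L.foldl (fun d num => d.insert num 0) (PySem.Dict.empty : PySem.Dict Int Int))).keys.Nodup := by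
    apply PySem.Dict.nodup_keys_foldl_insert
    apply PySem.Dict.nodup_keys_foldl_insert
    simp [PySem.Dict.keys_empty]
  rw [PySem.Dict.items_eq_map_keys _ hnd 0,
    PySem.Dict.keys_foldl_insert (f := fun d num => d.getD num 0 + 1), hk1, pv_update_self,
    PySem.Dict.items_counter]
  apply List.map_congr_left
  intro k _
  rw [PySem.Dict.getD_foldl_insert_add_one, pv_phase1_getD]
  split_ifs <;> simp

-- the list A builds is the digit sums of 1..n
theorem pv_listA_eq (n : Int) :
    ((PySem.List.pyRange 1 (n + 1) 1).map (fun i => PySem.Int.toStr i)).map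
        (fun s => ((s.toList.map (fun c => (PySem.Int.ofChars? [c]).getD 0)).sum))
      = (PySem.List.pyRange 1 (n + 1) 1).map (fun i => pvDsum i.toNat) := by
  rw [List.map_map]
  apply List.map_congr_left
  intro i hi
  have h1 : 1 ≤ i := ((PySem.List.mem_pyRange_one).mp hi).1
  simp only [Function.comp]
  exact pv_strDigitSum_eq i (by omega)

-- list-indexed update, as Python's v[s] = x (index in range)
theorem pv_getD_set (v : List Int) (a j : Nat) (x : Int) :
    (v.set a x).getD j 0 = if a = j ∧ a < v.length then x else v.getD j 0 := by
  rw [List.getD_eq_getElem?_getD, List.getD_eq_getElem?_getD, List.getElem?_set]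
  by_cases h1 : a = j
  · subst h1
    by_cases h2 : a < v.length
    · simp [h2]
    · simp [h2]
  · simp [h1]

-- list sums over List.range as Finset sums
theorem pv_sum_range (f : Nat → Nat) (k : Nat) :
    ((List.range k).map f).sum = ∑ dd ∈ Finset.range k, f dd := by
  induction k with
  | zero => simp
  | succ k ih => rw [List.range_succ, Finset.sum_range_succ, List.map_append, List.sum_append, ih]; simp

-- counting with a negative target is impossible
theorem pvCnt_neg (t : Nat) (s : Int) (hs : s < 0) : pvCnt t s = 0 := by
  rw [pvCnt, List.countP_eq_zero]
  intro x _
  have := pvDsum_nonneg x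
  simp only [beq_iff_eq]
  omega

-- pvCnt as a Finset card
theorem pvCnt_card (t : Nat) (s : Int) :
    pvCnt t s = ((Finset.range t).filter (fun x => pvDsum x = s)).card := by
  induction t with
  | zero => simp [pvCnt]
  | succ t ih =>
    rw [pvCnt, List.range_succ, List.countP_append, Finset.range_add_one, Finset.filter_insert]
    rw [← pvCnt, ih]
    by_cases h : pvDsum t = s
    · rw [if_pos h, Finset.card_insert_of_notMem (by simp)]
      simp [h]
    · rw [if_neg h]
      simp [h]

-- decade decomposition: counting digit sums over [0, m] splits by the last digit
theorem pvCnt_decade (m : Nat) (s : Int) :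
    pvCnt (m + 1) s
      = ((List.range 10).map (fun dd =>
          pvCnt (if dd ≤ m % 10 then m / 10 + 1 else m / 10) (s - dd))).sum := by
  rw [pvCnt_card, pv_sum_range]
  have stepA : ((Finset.range (m + 1)).filter (fun x => pvDsum x = s)).card
      = ∑ dd ∈ Finset.range 10,
          ((Finset.range (m + 1)).filter (fun x => pvDsum x = s ∧ x % 10 = dd)).card := by
    simp only [Finset.card_filter]
    rw [Finset.sum_comm]
    apply Finset.sum_congr rfl
    intro x _
    by_cases h : pvDsum x = s
    · simp only [h, true_and]
      rw [Finset.sum_ite_eq (Finset.range 10) (x % 10) (fun _ => 1)]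
      simp [Nat.mod_lt x (by omega : 0 < 10)]
    · simp [h]
  rw [stepA]
  apply Finset.sum_congr rfl
  intro dd hdd
  have hdd10 : dd < 10 := Finset.mem_range.mp hdd
  rw [pvCnt_card]
  apply Finset.card_bij' (fun x _ => x / 10) (fun q _ => 10 * q + dd)
  · intro x hx
    simp only [Finset.mem_filter, Finset.mem_range] at hx ⊢
    obtain ⟨hxm, hds, hmod⟩ := hx
    constructor
    · split_ifs with hc <;> omega
    · rw [pvDsum_split, hmod] at hds
      omega
  · intro x hx
    simp only [Finset.mem_filter, Finset.mem_range] at hx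
    omega
  · intro q hq
    omega
  · intro q hq
    simp only [Finset.mem_filter, Finset.mem_range] at hq ⊢
    obtain ⟨hqc, hds⟩ := hq
    have e1 : (10 * q + dd) / 10 = q := by omega
    have e2 : (10 * q + dd) % 10 = dd := by omega
    refine ⟨?_, ?_, e2⟩
    · split_ifs at hqc with hc <;> omega
    · rw [pvDsum_split, e1, e2]
      omega

-- inner loop: one pass of 'for s in range(a, a+k): v[s] += g s'
theorem pv_inner_getD (g : Nat → Int) : ∀ (k a : Nat) (v : List Int) (j : Nat),
    ((List.range' a k).foldl (fun v s => v.set s (v.getD s 0 + g s)) v).getD j 0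
      = v.getD j 0 + (if a ≤ j ∧ j < a + k ∧ j < v.length then g j else 0) := by
  intro k
  induction k with
  | zero =>
    intro a v j
    rw [if_neg (by omega)]
    simp [List.range']
  | succ k ih =>
    intro a v j
    rw [List.range'_succ, List.foldl_cons, ih, pv_getD_set, List.length_set]
    by_cases h1 : a = j
    · subst h1
      by_cases h2 : a < v.length
      · rw [if_pos ⟨rfl, h2⟩, if_neg (by omega), if_pos ⟨le_refl _, by omega, h2⟩]
        ring
      · rw [if_neg (by tauto), if_neg (by omega), if_neg (by omega)]
    · rw [if_neg (by tauto)]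
      by_cases h3 : a + 1 ≤ j ∧ j < a + 1 + k ∧ j < v.length
      · rw [if_pos h3, if_pos (by omega)]
      · rw [if_neg h3, if_neg (by omega)]

theorem pv_inner_length (g : Nat → Int) : ∀ (l : List Nat) (v : List Int),
    (l.foldl (fun v s => v.set s (v.getD s 0 + g s)) v).length = v.length := by
  intro l
  induction l with
  | nil => simp
  | cons x l ih =>
    intro v
    rw [List.foldl_cons, ih, List.length_set]

-- outer loop over the digits dd
theorem pv_outer_getD (top low : List Int) (r : Int) (size : Nat) :
    ∀ (dl : List Nat) (v : List Int), v.length = size → ∀ (j : Nat), j < size →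
    ((dl.foldl (fun v dd =>
        (List.range' dd (size - dd)).foldl
          (fun v s => v.set s (v.getD s 0 + (if (dd : Int) ≤ r then top else low).getD (s - dd) 0)) v) v).getD j 0
      = v.getD j 0 + (dl.map (fun dd =>
          if dd ≤ j then (if (dd : Int) ≤ r then top else low).getD (j - dd) 0 else 0)).sum) := by
  intro dl
  induction dl with
  | nil => simp
  | cons dd dl ih =>
    intro v hv j hj
    rw [List.foldl_cons, List.map_cons, List.sum_cons,
      ih _ (by rw [pv_inner_length]; exact hv) j hj, pv_inner_getD]
    by_cases h : dd ≤ j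
    · rw [if_pos (by omega), if_pos h]
      ring
    · rw [if_neg (by omega), if_neg h]
      ring

theorem pv_outer_length (top low : List Int) (r : Int) (size : Nat) :
    ∀ (dl : List Nat) (v : List Int),
    (dl.foldl (fun v dd =>
        (List.range' dd (size - dd)).foldl
          (fun v s => v.set s (v.getD s 0 + (if (dd : Int) ≤ r then top else low).getD (s - dd) 0)) v) v).length
      = v.length := by
  intro dl
  induction dl with
  | nil => simp
  | cons dd dl ih =>
    intro v
    rw [List.foldl_cons, ih, pv_inner_length]

theorem pvFreq_getD_aux (size : Nat) : ∀ (k : Nat) (m : Int), m.toNat ≤ k → ∀ (j : Nat), j < size →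
    (pvFreq size m).getD j 0 = (pvCnt (m + 1).toNat ((j : Nat) : Int) : Int) := by
  intro k
  induction k using Nat.strong_induction_on with
  | _ k ih =>
    intro m hm j hj
    by_cases hneg : m < 0
    · rw [pvFreq, dif_pos hneg]
      rw [show (m + 1).toNat = 0 by omega]
      simp [pvCnt]
    · by_cases h0 : m = 0
      · subst h0
        rw [pvFreq, dif_neg (by omega), dif_pos rfl, pv_getD_set]
        have hds0 : pvDsum 0 = 0 := by rw [pvDsum]; simp
        have hc : pvCnt ((0 : Int) + 1).toNat ((j : Nat) : Int) = if j = 0 then 1 else 0 := by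
          rw [show ((0 : Int) + 1).toNat = 1 by omega]
          simp only [pvCnt, List.range_one, List.countP_cons, List.countP_nil, hds0, beq_iff_eq]
          by_cases hj0 : j = 0 <;> simp [hj0]
          omega
        by_cases hj0 : j = 0
        · subst hj0
          rw [if_pos ⟨rfl, by simpa using hj⟩, hc]
          simp
        · rw [if_neg (by tauto), hc, if_neg hj0]
          simp
      · -- m ≥ 1: the recursive decade case
        have hm1 : 1 ≤ m := by omega
        have hq : PySem.Int.floordiv m 10 = ((m.toNat / 10 : Nat) : Int) := by
          rw [PySem.Int.floordiv_eq_ediv_of_pos (by omega : (0:Int) < 10)]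
          omega
        have hr : PySem.Int.mod m 10 = ((m.toNat % 10 : Nat) : Int) := by
          rw [PySem.Int.mod_eq_emod_of_pos (by omega : (0:Int) < 10)]
          omega
        have htopN : (PySem.Int.floordiv m 10 + 1).toNat = m.toNat / 10 + 1 := by
          rw [hq]; omega
        have hlowN : (PySem.Int.floordiv m 10 - 1 + 1).toNat = m.toNat / 10 := by
          rw [hq]; omega
        have IHtop : ∀ j' : Nat, j' < size →
            (pvFreq size (PySem.Int.floordiv m 10)).getD j' 0
              = (pvCnt (m.toNat / 10 + 1) ((j' : Nat) : Int) : Int) := by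
          intro j' hj'
          rw [← htopN]
          exact ih (m.toNat / 10) (by omega) _ (by rw [hq]; omega) j' hj'
        have IHlow : ∀ j' : Nat, j' < size →
            (pvFreq size (PySem.Int.floordiv m 10 - 1)).getD j' 0
              = (pvCnt (m.toNat / 10) ((j' : Nat) : Int) : Int) := by
          intro j' hj'
          rw [← hlowN]
          exact ih (m.toNat / 10) (by omega) _ (by rw [hq]; omega) j' hj'
        rw [pvFreq, dif_neg hneg, dif_neg h0]
        simp only []
        rw [pv_outer_getD (pvFreq size (PySem.Int.floordiv m 10))
          (pvFreq size (PySem.Int.floordiv m 10 - 1)) (PySem.Int.mod m 10) size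
          (List.range 10) _ (by simp) j hj]
        rw [List.getD_replicate _ hj, zero_add, show (m + 1).toNat = m.toNat + 1 by omega,
          pvCnt_decade, Nat.cast_list_sum, List.map_map]
        refine congrArg List.sum (List.map_congr_left ?_)
        intro dd hdd
        have hdd10 : dd < 10 := List.mem_range.mp hdd
        simp only [Function.comp]
        by_cases hdj : dd ≤ j
        · have hcast : (((j - dd : Nat)) : Int) = (j : Int) - dd := by omega
          rw [if_pos hdj]
          by_cases hc : (dd : Int) ≤ PySem.Int.mod m 10
          · have hc' : dd ≤ m.toNat % 10 := by rw [hr] at hc; exact_mod_cast hc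
            rw [if_pos hc, IHtop (j - dd) (by omega), hcast, if_pos hc']
          · have hc' : ¬ dd ≤ m.toNat % 10 := by rw [hr] at hc; exact_mod_cast hc
            rw [if_neg hc, IHlow (j - dd) (by omega), hcast, if_neg hc']
        · rw [if_neg hdj, pvCnt_neg _ _ (by omega)]
          simp

theorem pvFreq_getD (size : Nat) (m : Int) : ∀ (j : Nat), j < size →
    (pvFreq size m).getD j 0 = (pvCnt (m + 1).toNat ((j : Nat) : Int) : Int) :=
  pvFreq_getD_aux size m.toNat m (le_refl _)

theorem pvFreq_length (size : Nat) (m : Int) : (pvFreq size m).length = size := by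
  rw [pvFreq]
  split_ifs with h1 h2
  · simp
  · simp
  · rw [pv_outer_length]
    simp

-- the count of each digit sum s ≥ 1 over 1..n, seen from A's list
theorem pv_count_bridge (n : Int) (s : Int) (hs : 1 ≤ s) :
    ((PySem.List.pyRange 1 (n + 1) 1).map (fun i => pvDsum i.toNat)).count s
      = pvCnt (n.toNat + 1) s := by
  have hds0 : pvDsum 0 = 0 := by rw [pvDsum]; simp
  rw [PySem.List.pyRange_one, show ((n + 1) - 1 : Int) = n by ring, List.map_map,
    List.count_eq_countP, List.countP_map, pvCnt, List.range_succ_eq_map, List.countP_cons,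
    List.countP_map, if_neg (by simp only [hds0, beq_iff_eq]; omega), Nat.add_zero]
  apply List.countP_congr
  intro k _
  simp only [Function.comp, beq_iff_eq, Nat.succ_eq_add_one]
  rw [show ((1 : Int) + (k : Nat)).toNat = k + 1 by omega]

-- the B-side tail of the frequency vector, as counts per digit sum
theorem pv_tail_eq (n : Int) (hn : 1 ≤ n) (SZ : Nat) (hSZ : 1 ≤ SZ) :
    (pvFreq SZ n).tail
      = (List.range (SZ - 1)).map (fun (j : Nat) => (pvCnt (n.toNat + 1) (((j : Nat) : Int) + 1) : Int)) := by
  apply List.ext_getElem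
  · simp [pvFreq_length]
  · intro i h1 h2
    have hi : i + 1 < SZ := by
      simp only [List.length_tail, pvFreq_length] at h1
      omega
    rw [List.getElem_tail, ← List.getD_eq_getElem _ 0 (by rw [pvFreq_length]; exact hi),
      pvFreq_getD SZ n (i + 1) hi, show (n + 1).toNat = n.toNat + 1 by omega,
      show ((i + 1 : Nat) : Int) = (i : Int) + 1 by push_cast; ring,
      List.getElem_map, List.getElem_range]

-- ===== VERDICT (by name: the statement is the Claim_ definition above) =====
theorem lotteryCoupons_spec : Claim_equal_lotteryCoupons := by
  intro n _
  unfold Spec_lotteryCoupons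
  by_cases hn : n ≤ 0
  · rw [lotteryCoupons_alt, if_pos hn]
    simp only [lotteryCoupons, PySem.List.pyRange_one_eq_nil (by omega : n + 1 ≤ 1)]
    rfl
  · have hn1 : 1 ≤ n := by omega
    -- reduce A to (counter L) over the digit-sum list L
    simp only [lotteryCoupons, pv_listA_eq, pv_dictA_eq_counter]
    set L := (PySem.List.pyRange 1 (n + 1) 1).map (fun i => pvDsum i.toNat) with hL
    -- reduce B to the tail of the frequency vector
    rw [lotteryCoupons_alt, if_neg hn]
    simp only []
    have hnd : pvNdigLoop 0 n = ((pvNdigN n.toNat : Nat) : Int) := by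
      have h := pvNdigLoop_eq 0 n.toNat
      rw [show ((n.toNat : Nat) : Int) = n by omega] at h
      rw [h, zero_add]
    set D := pvNdigN n.toNat with hD
    have hD1 : 1 ≤ D := by
      rw [hD, pvNdigN, if_neg (by omega)]
      omega
    have hsz : (9 * pvNdigLoop 0 n + 1).toNat = 9 * D + 1 := by rw [hnd]; omega
    set SZ : Nat := 9 * D + 1 with hSZdef
    rw [hsz, PySem.List.slice_from_one, pv_tail_eq n hn1 SZ (by omega)]
    set W := (List.range (SZ - 1)).map (fun (j : Nat) => (pvCnt (n.toNat + 1) (((j : Nat) : Int) + 1) : Int)) with hW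
    -- facts about L
    have hne : L ≠ [] := by
      rw [hL]
      apply List.ne_nil_of_length_pos
      simp only [List.length_map, PySem.List.length_pyRange_one]
      omega
    have hbounds : ∀ x ∈ L, 1 ≤ x ∧ x < (SZ : Int) := by
      intro x hx
      rw [hL] at hx
      obtain ⟨i, hi, rfl⟩ := List.mem_map.mp hx
      obtain ⟨hi1, hi2⟩ := PySem.List.mem_pyRange_one.mp hi
      refine ⟨pvDsum_pos _ (by omega), ?_⟩
      have h1 := pvDsum_le i.toNat
      have h2 : pvNdigN i.toNat ≤ D := hD ▸ pvNdigN_mono _ _ (by omega)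
      have h3 : (pvNdigN i.toNat : Int) ≤ (D : Int) := by exact_mod_cast h2
      have h4 : (SZ : Int) = 9 * (D : Int) + 1 := by rw [hSZdef]; push_cast; ring
      omega
    have hcnt : ∀ s : Int, 1 ≤ s → (L.count s : Int) = (pvCnt (n.toNat + 1) s : Int) := by
      intro s hs
      have h := pv_count_bridge n s hs
      rw [hL]
      exact_mod_cast h
    -- facts about Counter(L)
    have hK : (PySem.Dict.counter L).keys = PySem.Set.ofList L := PySem.Dict.keys_counter L
    have hV : (PySem.Dict.counter L).values
        = (PySem.Set.ofList L).map (fun k => (L.count k : Int)) := by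
      rw [PySem.Dict.values_eq_map_keys _ (PySem.Dict.nodup_keys_counter L) 0, hK]
      exact List.map_congr_left (fun k _ => PySem.Dict.getD_counter L k)
    obtain ⟨x0, hx0⟩ := List.exists_mem_of_ne_nil L hne
    have hVne : (PySem.Dict.counter L).values ≠ [] := by
      rw [hV]
      exact List.ne_nil_of_mem (List.mem_map_of_mem ((PySem.Set.mem_ofList L x0).mpr hx0))
    obtain ⟨mx, hmx⟩ : ∃ mx, PySem.List.max? (PySem.Dict.counter L).values (fun y => y) = some mx := by
      cases h : PySem.List.max? (PySem.Dict.counter L).values (fun y => y) with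
      | none => exact absurd ((PySem.List.max?_eq_none_iff _ _).mp h) hVne
      | some m => exact ⟨m, rfl⟩
    have hmxmem := PySem.List.max?_mem hmx
    rw [hV] at hmxmem
    obtain ⟨k0, hk0K, hk0eq⟩ := List.mem_map.mp hmxmem
    have hk0L : k0 ∈ L := (PySem.Set.mem_ofList L k0).mp hk0K
    have hmx1 : 1 ≤ mx := by
      rw [← hk0eq]
      have : 0 < L.count k0 := List.count_pos_iff.mpr hk0L
      omega
    have hcle : ∀ t : Int, (L.count t : Int) ≤ mx := by
      intro t
      by_cases ht : t ∈ L
      · have hmem : ((L.count t : Nat) : Int) ∈ (PySem.Dict.counter L).values := by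
          rw [hV]
          exact List.mem_map_of_mem ((PySem.Set.mem_ofList L t).mpr ht)
        exact PySem.List.max?_isMax hmx _ hmem
      · rw [List.count_eq_zero.mpr ht]
        omega
    -- the maximum over the frequency vector's tail is mx as well
    have hWne : W ≠ [] := by
      rw [hW]
      apply List.ne_nil_of_length_pos
      simp only [List.length_map, List.length_range]
      omega
    obtain ⟨mw, hmw⟩ : ∃ mw, PySem.List.max? W (fun y => y) = some mw := by
      cases h : PySem.List.max? W (fun y => y) with
      | none => exact absurd ((PySem.List.max?_eq_none_iff _ _).mp h) hWne
      | some m => exact ⟨m, rfl⟩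
    have hmxW : mx ∈ W := by
      have hb := hbounds k0 hk0L
      rw [hW]
      refine List.mem_map.mpr ⟨k0.toNat - 1, List.mem_range.mpr (by omega), ?_⟩
      rw [show ((k0.toNat - 1 : Nat) : Int) + 1 = k0 by omega, ← hcnt k0 hb.1, hk0eq]
    have hmweq : mw = mx := by
      refine le_antisymm ?_ (PySem.List.max?_isMax hmw _ hmxW)
      have hmem := PySem.List.max?_mem hmw
      rw [hW] at hmem
      obtain ⟨j, hj, rfl⟩ := List.mem_map.mp hmem
      rw [← hcnt (((j : Nat) : Int) + 1) (by omega)]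
      exact hcle _
    -- both sides count the digit sums of maximal frequency
    rw [hmx, hmw, Option.getD_some, Option.getD_some, hmweq, List.length_map,
      PySem.List.sum_map_ite_one_zero, hK]
    simp only [PySem.Dict.getD_counter]
    rw [hW, List.countP_map]
    congr 1
    have hstep1 : (List.range (SZ - 1)).countP
          ((fun c => c == mx) ∘ (fun (j : Nat) => (pvCnt (n.toNat + 1) (((j : Nat) : Int) + 1) : Int)))
        = (List.range (SZ - 1)).countP
          ((fun t => (L.count t : Int) == mx) ∘ (fun (j : Nat) => ((j : Nat) : Int) + 1)) := by
      apply List.countP_congr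
      intro j _
      simp only [Function.comp, beq_iff_eq]
      rw [hcnt (((j : Nat) : Int) + 1) (by omega)]
    rw [hstep1, ← List.countP_map, List.countP_eq_length_filter]
    set T := (List.range (SZ - 1)).map (fun (j : Nat) => ((j : Nat) : Int) + 1) with hT
    have hTnodup : T.Nodup := by
      rw [hT]
      exact List.Nodup.map (fun a b h => by omega) List.nodup_range
    have hperm : ((PySem.Set.ofList L).filter (fun k => (L.count k : Int) == mx)).Perm
        (T.filter (fun k => (L.count k : Int) == mx)) := by
      rw [List.perm_ext_iff_of_nodup ((PySem.Set.nodup_ofList L).filter _) (hTnodup.filter _)]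
      intro a
      simp only [List.mem_filter, PySem.Set.mem_ofList, beq_iff_eq, and_congr_left_iff]
      intro hacount
      constructor
      · intro haL
        have hb := hbounds a haL
        rw [hT]
        exact List.mem_map.mpr ⟨a.toNat - 1, List.mem_range.mpr (by omega), by omega⟩
      · intro haT
        have hpos : 0 < L.count a := by omega
        exact List.count_pos_iff.mp hpos
    exact hperm.length_eq
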